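-- pv_equiv track=rewrite | github.com/splx7/gridflow | backend/engine/simulation/runner.py | _hour_to_month
-- ===== SOURCE A (Python) =====
-- def _hour_to_month(hour_index: int) -> int:
--     """Convert a 0-based hour-of-year index to a 1-based month (1--12)."""
--     _MONTH_START_HOURS = [
--         0, 744, 1416, 2160, 2880, 3624,
--         4344, 5088, 5832, 6552, 7296, 8016,
--     ]
--     for m in range(11, -1, -1):
--         if hour_index >= _MONTH_START_HOURS[m]:
--             return m + 1  # 1-based
--     return 1  # pragma: no cover
-- ===== SOURCE B (Python) =====
-- def _hour_to_month(hour_index: int) -> int: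
--     """Convert a 0-based hour-of-year index to a 1-based month (1--12)."""
--     _MONTH_HOURS = [744, 672, 744, 720, 744, 720, 744, 744, 720, 744, 720, 744]
--     acc = 0
--     for m, month_hours in enumerate(_MONTH_HOURS):
--         acc += month_hours
--         if hour_index < acc:
--             return m + 1
--     return 12
-- ===== Notes on version B (the rewrite author's own statement) =====
-- stated objective: alternative
-- what changed: Replaces the reverse scan over a static table of month-start offsets with a forward loop over month lengths that maintains a running cumulative-hours accumulator and returns at the first month whose cumulative end exceeds the index.
import Mathlib
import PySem

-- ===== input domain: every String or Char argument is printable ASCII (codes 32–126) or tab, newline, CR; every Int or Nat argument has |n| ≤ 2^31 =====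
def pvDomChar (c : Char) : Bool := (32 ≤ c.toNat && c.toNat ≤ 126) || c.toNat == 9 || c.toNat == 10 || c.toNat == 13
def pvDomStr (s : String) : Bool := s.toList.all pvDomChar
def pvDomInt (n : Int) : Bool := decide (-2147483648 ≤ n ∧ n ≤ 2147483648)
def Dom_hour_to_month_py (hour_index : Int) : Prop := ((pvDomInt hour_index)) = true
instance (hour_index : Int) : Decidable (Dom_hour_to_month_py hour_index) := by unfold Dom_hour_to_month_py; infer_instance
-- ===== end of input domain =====

-- B replaces A's reverse scan over a table of month-start offsets with a forward loop over
-- month lengths maintaining a running cumulative-hours accumulator (objective: alternative).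

-- ===== PORT A =====
-- A's table _MONTH_START_HOURS (a local constant of the Python function).
def monthStartHours : List Int := [0, 744, 1416, 2160, 2880, 3624, 4344, 5088, 5832, 6552, 7296, 8016]

-- A's loop body: for m in range(11, -1, -1): if hour_index >= _MONTH_START_HOURS[m]: return m + 1.
-- Every m produced by the range is a valid index of the 12-element table, so pyGet? is always
-- some and getD's default 0 is never used (it only keeps the function total).
def hourToMonthLoopA (hour_index : Int) : List Int → Int
  | [] => 1
  | m :: rest =>
    if hour_index ≥ (PySem.List.pyGet? monthStartHours m).getD 0 then m + 1
    else hourToMonthLoopA hour_index rest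

def hour_to_month_py (hour_index : Int) : Int :=
  hourToMonthLoopA hour_index (PySem.List.pyRange 11 (-1) (-1))

-- ===== PORT B =====
-- B's loop body: acc = 0; for m, month_hours in enumerate(_MONTH_HOURS): acc += month_hours;
-- if hour_index < acc: return m + 1; after the loop return 12.
def hourToMonthLoopB (hour_index : Int) (acc : Int) : List (Int × Int) → Int
  | [] => 12
  | (m, len) :: rest =>
    let acc' := acc + len
    if hour_index < acc' then m + 1 else hourToMonthLoopB hour_index acc' rest

def hour_to_month_py_alt (hour_index : Int) : Int :=
  hourToMonthLoopB hour_index 0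
    (PySem.List.enumerate [744, 672, 744, 720, 744, 720, 744, 744, 720, 744, 720, 744])

-- ===== PRECONDITION & SPEC =====
def Spec_hour_to_month_py (hour_index : Int) (out : Int) : Prop := out = hour_to_month_py_alt hour_index
instance (hour_index : Int) (out : Int) : Decidable (Spec_hour_to_month_py hour_index out) := by unfold Spec_hour_to_month_py; infer_instance

-- ===== CLAIM (what is proved, stated in full; the proofs are below) =====
def Claim_equal_hour_to_month_py : Prop := ∀ (hour_index : Int), Dom_hour_to_month_py hour_index → Spec_hour_to_month_py hour_index (hour_to_month_py hour_index)

-- ===== LEMMAS AND PROOFS =====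

-- ===== VERDICT (by name: the statement is the Claim_ definition above) =====
theorem hour_to_month_py_spec : Claim_equal_hour_to_month_py := by
  intro h _
  unfold Spec_hour_to_month_py hour_to_month_py hour_to_month_py_alt
  rw [(by decide : PySem.List.pyRange 11 (-1) (-1) = [11, 10, 9, 8, 7, 6, 5, 4, 3, 2, 1, 0]),
    (by decide : PySem.List.enumerate ([744, 672, 744, 720, 744, 720, 744, 744, 720, 744, 720, 744] : List Int) 0
      = [(0, 744), (1, 672), (2, 744), (3, 720), (4, 744), (5, 720), (6, 744), (7, 744), (8, 720), (9, 744), (10, 720), (11, 744)])]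
  simp only [hourToMonthLoopA, hourToMonthLoopB]
  simp only [
    (by decide : (PySem.List.pyGet? monthStartHours 11).getD 0 = 8016),
    (by decide : (PySem.List.pyGet? monthStartHours 10).getD 0 = 7296),
    (by decide : (PySem.List.pyGet? monthStartHours 9).getD 0 = 6552),
    (by decide : (PySem.List.pyGet? monthStartHours 8).getD 0 = 5832),
    (by decide : (PySem.List.pyGet? monthStartHours 7).getD 0 = 5088),
    (by decide : (PySem.List.pyGet? monthStartHours 6).getD 0 = 4344),
    (by decide : (PySem.List.pyGet? monthStartHours 5).getD 0 = 3624),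
    (by decide : (PySem.List.pyGet? monthStartHours 4).getD 0 = 2880),
    (by decide : (PySem.List.pyGet? monthStartHours 3).getD 0 = 2160),
    (by decide : (PySem.List.pyGet? monthStartHours 2).getD 0 = 1416),
    (by decide : (PySem.List.pyGet? monthStartHours 1).getD 0 = 744),
    (by decide : (PySem.List.pyGet? monthStartHours 0).getD 0 = 0)]
  rcases lt_or_ge h 0 with c0|c0
  · rw [if_neg (by omega), if_neg (by omega), if_neg (by omega), if_neg (by omega), if_neg (by omega), if_neg (by omega), if_neg (by omega), if_neg (by omega), if_neg (by omega), if_neg (by omega), if_neg (by omega), if_neg (by omega), if_pos (by omega)]; try norm_num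
  rcases lt_or_ge h 744 with c1|c1
  · rw [if_neg (by omega), if_neg (by omega), if_neg (by omega), if_neg (by omega), if_neg (by omega), if_neg (by omega), if_neg (by omega), if_neg (by omega), if_neg (by omega), if_neg (by omega), if_neg (by omega), if_pos (by omega), if_pos (by omega)]; try norm_num
  rcases lt_or_ge h 1416 with c2|c2
  · rw [if_neg (by omega), if_neg (by omega), if_neg (by omega), if_neg (by omega), if_neg (by omega), if_neg (by omega), if_neg (by omega), if_neg (by omega), if_neg (by omega), if_neg (by omega), if_pos (by omega), if_neg (by omega), if_pos (by omega)]; try norm_num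
  rcases lt_or_ge h 2160 with c3|c3
  · rw [if_neg (by omega), if_neg (by omega), if_neg (by omega), if_neg (by omega), if_neg (by omega), if_neg (by omega), if_neg (by omega), if_neg (by omega), if_neg (by omega), if_pos (by omega), if_neg (by omega), if_neg (by omega), if_pos (by omega)]; try norm_num
  rcases lt_or_ge h 2880 with c4|c4
  · rw [if_neg (by omega), if_neg (by omega), if_neg (by omega), if_neg (by omega), if_neg (by omega), if_neg (by omega), if_neg (by omega), if_neg (by omega), if_pos (by omega), if_neg (by omega), if_neg (by omega), if_neg (by omega), if_pos (by omega)]; try norm_num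
  rcases lt_or_ge h 3624 with c5|c5
  · rw [if_neg (by omega), if_neg (by omega), if_neg (by omega), if_neg (by omega), if_neg (by omega), if_neg (by omega), if_neg (by omega), if_pos (by omega), if_neg (by omega), if_neg (by omega), if_neg (by omega), if_neg (by omega), if_pos (by omega)]; try norm_num
  rcases lt_or_ge h 4344 with c6|c6
  · rw [if_neg (by omega), if_neg (by omega), if_neg (by omega), if_neg (by omega), if_neg (by omega), if_neg (by omega), if_pos (by omega), if_neg (by omega), if_neg (by omega), if_neg (by omega), if_neg (by omega), if_neg (by omega), if_pos (by omega)]; try norm_num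
  rcases lt_or_ge h 5088 with c7|c7
  · rw [if_neg (by omega), if_neg (by omega), if_neg (by omega), if_neg (by omega), if_neg (by omega), if_pos (by omega), if_neg (by omega), if_neg (by omega), if_neg (by omega), if_neg (by omega), if_neg (by omega), if_neg (by omega), if_pos (by omega)]; try norm_num
  rcases lt_or_ge h 5832 with c8|c8
  · rw [if_neg (by omega), if_neg (by omega), if_neg (by omega), if_neg (by omega), if_pos (by omega), if_neg (by omega), if_neg (by omega), if_neg (by omega), if_neg (by omega), if_neg (by omega), if_neg (by omega), if_neg (by omega), if_pos (by omega)]; try norm_num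
  rcases lt_or_ge h 6552 with c9|c9
  · rw [if_neg (by omega), if_neg (by omega), if_neg (by omega), if_pos (by omega), if_neg (by omega), if_neg (by omega), if_neg (by omega), if_neg (by omega), if_neg (by omega), if_neg (by omega), if_neg (by omega), if_neg (by omega), if_pos (by omega)]; try norm_num
  rcases lt_or_ge h 7296 with c10|c10
  · rw [if_neg (by omega), if_neg (by omega), if_pos (by omega), if_neg (by omega), if_neg (by omega), if_neg (by omega), if_neg (by omega), if_neg (by omega), if_neg (by omega), if_neg (by omega), if_neg (by omega), if_neg (by omega), if_pos (by omega)]; try norm_num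
  rcases lt_or_ge h 8016 with c11|c11
  · rw [if_neg (by omega), if_pos (by omega), if_neg (by omega), if_neg (by omega), if_neg (by omega), if_neg (by omega), if_neg (by omega), if_neg (by omega), if_neg (by omega), if_neg (by omega), if_neg (by omega), if_neg (by omega), if_pos (by omega)]; try norm_num
  rw [if_pos (by omega), if_neg (by omega), if_neg (by omega), if_neg (by omega), if_neg (by omega), if_neg (by omega), if_neg (by omega), if_neg (by omega), if_neg (by omega), if_neg (by omega), if_neg (by omega), if_neg (by omega)]; try norm_num
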